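-- pv_equiv track=rewrite | github.com/maletsden/meshpress | encoder/implementation/elipsoid_fitter.py | calculate_remapping
-- ===== SOURCE A (Python) =====
-- from collections import Counter
--
-- def calculate_remapping(strip, codes):
--     # Step 1: Count the frequency of each integer in the array
--     frequency = Counter(strip)
--
--     # Step 2: Sort integers by frequency in descending order
--     sorted_by_frequency = sorted(frequency.keys(), key=lambda x: -frequency[x])
--
--     # Step 3: Sort codes by length in ascending order
--     sorted_codes = {i: code for i, code in enumerate(codes)}
--     sorted_codes = sorted(sorted_codes.items(), key=lambda item: len(item[1]))
--     sorted_code_keys = [key for key, _ in sorted_codes]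
--
--     # Step 4: Create a remap dictionary by mapping each integer to the shortest available code
--     indices_remap = {original: new for original, new in zip(sorted_by_frequency, sorted_code_keys)}
--
--     return indices_remap
-- ===== SOURCE B (Python) =====
-- from collections import Counter
--
-- def calculate_remapping(strip, codes):
--     # Bucket/counting sort instead of comparison sorts (same stable orders).
--     freq = Counter(strip)
--     n = len(strip)
--
--     # keys grouped by frequency, first-appearance order inside each bucket
--     fbuckets = {}
--     for k, f in freq.items():
--         fbuckets.setdefault(f, []).append(k)
--     keys_by_freq = [k for f in range(n, 0, -1) for k in fbuckets.get(f, [])]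
--
--     # code indices grouped by code length, ascending index inside each bucket
--     lbuckets = {}
--     maxlen = 0
--     for i, c in enumerate(codes):
--         lbuckets.setdefault(len(c), []).append(i)
--         maxlen = max(maxlen, len(c))
--     code_order = [i for L in range(0, maxlen + 1) for i in lbuckets.get(L, [])]
--
--     return dict(zip(keys_by_freq, code_order))
-- ===== Notes on version B (the rewrite author's own statement) =====
-- stated objective: alternative
-- what changed: Both comparison sorts are replaced by bucket grouping: keys are grouped into frequency buckets read from highest to lowest frequency, and code indices into code-length buckets read in ascending length, reproducing both stable orders without sorting.
import Mathlib
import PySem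

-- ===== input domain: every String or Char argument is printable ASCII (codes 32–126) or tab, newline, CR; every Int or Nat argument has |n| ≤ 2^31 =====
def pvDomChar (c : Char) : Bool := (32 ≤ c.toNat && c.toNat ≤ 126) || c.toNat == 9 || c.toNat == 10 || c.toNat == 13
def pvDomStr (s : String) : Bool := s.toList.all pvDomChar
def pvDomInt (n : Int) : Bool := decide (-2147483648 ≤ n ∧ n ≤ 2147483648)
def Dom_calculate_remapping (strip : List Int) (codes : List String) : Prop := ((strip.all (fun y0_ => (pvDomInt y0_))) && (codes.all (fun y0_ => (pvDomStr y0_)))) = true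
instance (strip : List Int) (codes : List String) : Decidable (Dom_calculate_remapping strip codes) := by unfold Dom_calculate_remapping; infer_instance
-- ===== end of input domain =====

-- B replaces both comparison sorts by bucket grouping (group keys by frequency, code
-- indices by code length, then concatenate buckets); objective: alternative algorithm.

-- ===== PORT A =====
def calculate_remapping (strip : List Int) (codes : List String) : List (Int × Int) :=
  let frequency := PySem.Dict.counter strip
  let sorted_by_frequency :=
    PySem.List.sorted frequency.keys (fun x => -(frequency.getD x 0)) false
  let sorted_codes0 : PySem.Dict Int String :=
    (PySem.List.enumerate codes).foldl (fun d p => d.insert p.1 p.2) PySem.Dict.empty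
  let sorted_codes :=
    PySem.List.sorted sorted_codes0.items (fun item => PySem.Str.len item.2) false
  let sorted_code_keys := sorted_codes.map (fun p => p.1)
  let indices_remap :=
    (sorted_by_frequency.zip sorted_code_keys).foldl
      (fun d p => d.insert p.1 p.2) (PySem.Dict.empty : PySem.Dict Int Int)
  indices_remap.items

-- ===== PORT B =====
def calculate_remapping_alt (strip : List Int) (codes : List String) : List (Int × Int) :=
  let freq := PySem.Dict.counter strip
  let n : Int := strip.length
  let fbuckets : PySem.Dict Int (List Int) :=
    freq.items.foldl (fun d p => d.modify p.2 [] (fun l => l ++ [p.1])) PySem.Dict.empty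
  let keys_by_freq := (PySem.List.pyRange n 0 (-1)).flatMap (fun f => fbuckets.getD f [])
  let st :=
    (PySem.List.enumerate codes).foldl
      (fun (s : PySem.Dict Int (List Int) × Int) p =>
        (s.1.modify (PySem.Str.len p.2) [] (fun l => l ++ [p.1]),
         max s.2 (PySem.Str.len p.2)))
      (PySem.Dict.empty, 0)
  let code_order := (PySem.List.pyRange 0 (st.2 + 1) 1).flatMap (fun L => st.1.getD L [])
  (PySem.Dict.ofList (keys_by_freq.zip code_order)).items

-- ===== PRECONDITION & SPEC =====
def Spec_calculate_remapping (strip : List Int) (codes : List String) (out : List (Int × Int)) : Prop := out = calculate_remapping_alt strip codes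
instance (strip : List Int) (codes : List String) (out : List (Int × Int)) : Decidable (Spec_calculate_remapping strip codes out) := by unfold Spec_calculate_remapping; infer_instance

-- ===== CLAIM (what is proved, stated in full; the proofs are below) =====
def Claim_equal_calculate_remapping : Prop := ∀ (strip : List Int) (codes : List String), Dom_calculate_remapping strip codes → Spec_calculate_remapping strip codes (calculate_remapping strip codes)

-- ===== LEMMAS AND PROOFS =====

lemma insertBy_cons {α : Type} (before : α → α → Bool) (x y : α) (ys : List α) :
    PySem.List.insertBy before x (y :: ys) =
      if before x y then x :: y :: ys else y :: PySem.List.insertBy before x ys := rfl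

lemma insertBy_append_not {α : Type} (before : α → α → Bool) (x : α) (A B : List α)
    (h : ∀ a ∈ A, before x a = false) :
    PySem.List.insertBy before x (A ++ B) = A ++ PySem.List.insertBy before x B := by
  induction A with
  | nil => simp
  | cons a A ih =>
    have ha := h a (by simp)
    rw [List.cons_append, insertBy_cons, ha, if_neg Bool.false_ne_true,
        ih (fun a' ha' => h a' (List.mem_cons_of_mem _ ha'))]
    rfl

lemma insertBy_all_before {α : Type} (before : α → α → Bool) (x : α) (B : List α)
    (h : ∀ b ∈ B, before x b = true) :
    PySem.List.insertBy before x B = x :: B := by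
  cases B with
  | nil => rfl
  | cons b B => simp [insertBy_cons, h b (by simp)]

lemma flatMap_congr_mem {α β : Type} {l : List α} {f g : α → List β}
    (h : ∀ a ∈ l, f a = g a) : l.flatMap f = l.flatMap g := by
  induction l with
  | nil => rfl
  | cons a l ih =>
    simp only [List.flatMap_cons, h a (by simp), ih (fun a' ha' => h a' (by simp [ha']))]

-- a Python stable sort by an Int key is the concatenation of the key-buckets,
-- taken along any strictly increasing list of key values covering the list
lemma sorted_eq_flatMap_filter {α : Type} (key : α → Int) (l : List α) (vs : List Int)
    (hvs : vs.Pairwise (· < ·)) (hm : ∀ x ∈ l, key x ∈ vs) :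
    PySem.List.sorted l key false = vs.flatMap (fun v => l.filter (fun x => key x == v)) := by
  induction l using List.reverseRecOn with
  | nil => simp [PySem.List.sorted_eq_foldl_insertBy]
  | append_singleton l' x ih =>
    have hx : key x ∈ vs := hm x (by simp)
    obtain ⟨vs₁, vs₂, hv⟩ := List.append_of_mem hx
    subst hv
    have hpw := List.pairwise_append.mp hvs
    have h₁ : ∀ v ∈ vs₁, v < key x := fun v hvm => hpw.2.2 v hvm (key x) (by simp)
    have h₂ : ∀ w ∈ vs₂, key x < w := (List.pairwise_cons.mp hpw.2.1).1
    rw [PySem.List.sorted_eq_foldl_insertBy, List.foldl_append,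
        ← PySem.List.sorted_eq_foldl_insertBy,
        ih (fun y hy => hm y (by simp [hy]))]
    simp only [List.foldl_cons, List.foldl_nil]
    set F := fun v => l'.filter (fun y => key y == v) with hF
    have keyF : ∀ v : Int, ∀ a ∈ F v, key a = v := by
      intro v a ha
      simpa using (List.of_mem_filter ha)
    have keyF1 : ∀ a ∈ vs₁.flatMap F, key a < key x := by
      intro a ha
      obtain ⟨v, hvm, ha⟩ := List.mem_flatMap.mp ha
      rw [keyF v a ha]; exact h₁ v hvm
    have keyF2 : ∀ a ∈ vs₂.flatMap F, key x < key a := by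
      intro a ha
      obtain ⟨v, hvm, ha⟩ := List.mem_flatMap.mp ha
      rw [keyF v a ha]; exact h₂ v hvm
    have lhs :
        PySem.List.insertBy (fun a b => decide (key a < key b)) x
            ((vs₁ ++ key x :: vs₂).flatMap F)
          = vs₁.flatMap F ++ (F (key x) ++ [x]) ++ vs₂.flatMap F := by
      rw [List.flatMap_append, List.flatMap_cons, ← List.append_assoc]
      rw [insertBy_append_not _ x (vs₁.flatMap F ++ F (key x)) (vs₂.flatMap F)
        (by
          intro a ha
          rcases List.mem_append.mp ha with ha | ha
          · exact decide_eq_false (not_lt.mpr (le_of_lt (keyF1 a ha)))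
          · exact decide_eq_false (not_lt.mpr (le_of_eq (keyF (key x) a ha))))]
      rw [insertBy_all_before _ x (vs₂.flatMap F)
        (fun b hb => decide_eq_true (keyF2 b hb))]
      simp
    rw [lhs]
    have rhs :
        (vs₁ ++ key x :: vs₂).flatMap (fun v => (l' ++ [x]).filter (fun y => key y == v))
          = vs₁.flatMap F ++ (F (key x) ++ [x]) ++ vs₂.flatMap F := by
      rw [List.flatMap_append, List.flatMap_cons]
      have hone : ∀ v : Int, (l' ++ [x]).filter (fun y => key y == v)
          = F v ++ (if key x == v then [x] else []) := by
        intro v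
        rw [List.filter_append, hF]
        by_cases hxv : key x = v
        · have hb : (key x == v) = true := by simpa using hxv
          simp [List.filter, hb]
        · have hb : (key x == v) = false := by simpa using hxv
          simp [List.filter, hb]
      have hside : ∀ v : Int, v ≠ key x →
          (l' ++ [x]).filter (fun y => key y == v) = F v := by
        intro v hv
        rw [hone v, if_neg (by simp only [beq_iff_eq]; exact Ne.symm hv)]
        simp
      rw [flatMap_congr_mem (f := fun v => (l' ++ [x]).filter (fun y => key y == v)) (g := F)
            (fun v hvm => hside v (ne_of_lt (h₁ v hvm))),
          flatMap_congr_mem (f := fun v => (l' ++ [x]).filter (fun y => key y == v)) (g := F)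
            (fun v hvm => hside v (ne_of_gt (h₂ v hvm))),
          hone (key x), if_pos (by simp)]
      simp [List.append_assoc]
    rw [rhs]

-- the grouping loop of B, read back bucket by bucket
lemma getD_modkey_fold {α κ : Type} [BEq κ] [LawfulBEq κ] [DecidableEq κ]
    (l : List (Int × α)) (g : α → κ) (d : PySem.Dict κ (List Int)) (c : κ) :
    (l.foldl (fun d p => d.modify (g p.2) [] (fun t => t ++ [p.1])) d).getD c []
      = d.getD c [] ++ (l.filter (fun p => g p.2 == c)).map (fun p => p.1) := by
  induction l generalizing d with
  | nil => simp
  | cons p l ih =>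
    rw [List.foldl_cons, ih, List.filter_cons]
    by_cases h : g p.2 = c
    · have hb : (g p.2 == c) = true := by simpa using h
      rw [hb, if_pos rfl, PySem.Dict.getD_modify, if_pos h.symm, h]
      simp
    · have hb : (g p.2 == c) = false := by simpa using h
      rw [hb, PySem.Dict.getD_modify, if_neg (fun hc => h hc.symm)]
      simp

lemma fbucket_getD (l : List (Int × Int)) (d : PySem.Dict Int (List Int)) (c : Int) :
    (l.foldl (fun d p => d.modify p.2 [] (fun t => t ++ [p.1])) d).getD c []
      = d.getD c [] ++ (l.filter (fun p => p.2 == c)).map (fun p => p.1) :=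
  getD_modkey_fold l (fun x => x) d c

lemma lbucket_getD (l : List (Int × String)) (d : PySem.Dict Int (List Int)) (c : Int) :
    (l.foldl (fun d p => d.modify (PySem.Str.len p.2) [] (fun t => t ++ [p.1])) d).getD c []
      = d.getD c [] ++ (l.filter (fun p => PySem.Str.len p.2 == c)).map (fun p => p.1) :=
  getD_modkey_fold l PySem.Str.len d c

lemma filter_map_pair {α β : Type} [BEq β] (S : List α) (g : α → β) (c : β) :
    ((S.map (fun k => (k, g k))).filter (fun p => p.2 == c)).map (fun p => p.1)
      = S.filter (fun k => g k == c) := by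
  induction S with
  | nil => rfl
  | cons a S ih =>
    by_cases h : (g a == c) = true
    · simp [h, ih]
    · simp [h, ih]

-- a fold over a pair state with independent components splits
lemma foldl_prod_split {α β γ : Type} (l : List α) (g : β → α → β) (h : γ → α → γ)
    (b : β) (c : γ) :
    l.foldl (fun s p => (g s.1 p, h s.2 p)) (b, c) = (l.foldl g b, l.foldl h c) := by
  induction l generalizing b c with
  | nil => rfl
  | cons a l ih => simp [List.foldl_cons, ih]

lemma le_foldl_max {α : Type} (l : List α) (m : Int) (f : α → Int) :
    m ≤ l.foldl (fun a x => max a (f x)) m := by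
  induction l generalizing m with
  | nil => simp
  | cons a l ih => exact le_trans (le_max_left _ _) (ih (max m (f a)))

lemma mem_le_foldl_max {α : Type} (l : List α) (m : Int) (f : α → Int) :
    ∀ x ∈ l, f x ≤ l.foldl (fun a x => max a (f x)) m := by
  induction l generalizing m with
  | nil => intro x hx; simp at hx
  | cons a l ih =>
    intro x hx
    rcases List.mem_cons.mp hx with h | h
    · subst h
      exact le_trans (le_max_right m (f x)) (le_foldl_max l _ f)
    · exact ih _ x h

lemma len_nonneg (s : String) : 0 ≤ PySem.Str.len s := by
  simp [PySem.Str.len]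

-- the two descending frequency enumerations agree
lemma pyRange_desc_map_neg (n : Int) :
    PySem.List.pyRange (-n) 0 1 = (PySem.List.pyRange n 0 (-1)).map (fun f => -f) := by
  rw [PySem.List.pyRange_one, PySem.List.pyRange_neg_one]
  simp only [List.map_map, zero_sub, neg_neg, Int.sub_zero]
  apply List.map_congr_left
  intro k _
  simp only [Function.comp]
  omega

-- ===== VERDICT (by name: the statement is the Claim_ definition above) =====
theorem calculate_remapping_spec : Claim_equal_calculate_remapping := by
  intro strip codes _
  unfold Spec_calculate_remapping calculate_remapping calculate_remapping_alt
  simp only []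
  -- frequency side
  have hkeys :
      PySem.List.sorted (PySem.Dict.counter strip).keys
          (fun x => -((PySem.Dict.counter strip).getD x 0)) false
        = (PySem.List.pyRange (strip.length : Int) 0 (-1)).flatMap
            (fun f =>
              ((PySem.Dict.counter strip).items.foldl
                  (fun d p => d.modify p.2 [] (fun l => l ++ [p.1]))
                  PySem.Dict.empty).getD f []) := by
    have hA := sorted_eq_flatMap_filter
        (fun x : Int => -((PySem.Dict.counter strip).getD x 0))
        (PySem.Dict.counter strip).keys
        (PySem.List.pyRange (-(strip.length : Int)) 0 1)
        (PySem.List.pairwise_lt_pyRange_one _ _)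
        (by
          intro x hxk
          rw [PySem.Dict.keys_counter] at hxk
          have hx : x ∈ strip := (PySem.Set.mem_ofList _ _).mp hxk
          show -((PySem.Dict.counter strip).getD x 0) ∈ _
          rw [PySem.Dict.getD_counter, PySem.List.mem_pyRange_one]
          have h1 : 1 ≤ strip.count x := List.count_pos_iff.mpr hx
          have h2 : strip.count x ≤ strip.length := List.count_le_length
          omega)
    rw [hA, pyRange_desc_map_neg, List.flatMap_map]
    apply flatMap_congr_mem
    intro f _
    show (PySem.Dict.counter strip).keys.filter
        (fun x => -((PySem.Dict.counter strip).getD x 0) == -f)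
      = ((PySem.Dict.counter strip).items.foldl
          (fun d p => d.modify p.2 [] (fun l => l ++ [p.1])) PySem.Dict.empty).getD f []
    rw [fbucket_getD, PySem.Dict.getD_empty, List.nil_append,
        PySem.Dict.items_counter, filter_map_pair, PySem.Dict.keys_counter]
    apply List.filter_congr
    intro x _
    show (-((PySem.Dict.counter strip).getD x 0) == -f) = ((strip.count x : Int) == f)
    rw [PySem.Dict.getD_counter]
    by_cases h : (strip.count x : Int) = f
    · have h2 : -(strip.count x : Int) = -f := by omega
      simp [h]
    · have h2 : ¬(-(strip.count x : Int) = -f) := by omega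
      simp [h, h2]
  -- code side
  have hitems :
      ((PySem.List.enumerate codes).foldl (fun d p => d.insert p.1 p.2)
          (PySem.Dict.empty : PySem.Dict Int String)).items
        = PySem.List.enumerate codes := by
    have h := PySem.Dict.items_foldl_insert_fresh (l := PySem.List.enumerate codes)
        (k := fun p => p.1) (v := fun p => p.2)
        (d := (PySem.Dict.empty : PySem.Dict Int String))
        (by intro a _; simp [PySem.Dict.contains_empty])
        (by rw [PySem.List.map_fst_enumerate]; exact PySem.List.nodup_pyRange_one _ _)
    simpa using h
  have hst := foldl_prod_split (PySem.List.enumerate codes)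
      (fun d (p : Int × String) => d.modify (PySem.Str.len p.2) [] (fun l => l ++ [p.1]))
      (fun m (p : Int × String) => max m (PySem.Str.len p.2))
      (PySem.Dict.empty : PySem.Dict Int (List Int)) 0
  rw [hitems, hst]
  set M := (PySem.List.enumerate codes).foldl
      (fun m (p : Int × String) => max m (PySem.Str.len p.2)) 0 with hM
  have hcodes :
      (PySem.List.sorted (PySem.List.enumerate codes)
          (fun item => PySem.Str.len item.2) false).map (fun p => p.1)
        = (PySem.List.pyRange 0 (M + 1) 1).flatMap
            (fun L =>
              ((PySem.List.enumerate codes).foldl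
                  (fun d p => d.modify (PySem.Str.len p.2) [] (fun l => l ++ [p.1]))
                  PySem.Dict.empty).getD L []) := by
    have hA := sorted_eq_flatMap_filter
        (fun p : Int × String => PySem.Str.len p.2)
        (PySem.List.enumerate codes)
        (PySem.List.pyRange 0 (M + 1) 1)
        (PySem.List.pairwise_lt_pyRange_one _ _)
        (by
          intro p hp
          show PySem.Str.len p.2 ∈ _
          rw [PySem.List.mem_pyRange_one]
          refine ⟨len_nonneg _, ?_⟩
          have hle : PySem.Str.len p.2 ≤ M := by
            rw [hM]
            exact mem_le_foldl_max (PySem.List.enumerate codes) 0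
              (fun p : Int × String => PySem.Str.len p.2) p hp
          omega)
    rw [hA, List.map_flatMap]
    apply flatMap_congr_mem
    intro L _
    show ((PySem.List.enumerate codes).filter
          (fun p => PySem.Str.len p.2 == L)).map (fun p => p.1)
      = ((PySem.List.enumerate codes).foldl
          (fun d p => d.modify (PySem.Str.len p.2) [] (fun l => l ++ [p.1]))
          PySem.Dict.empty).getD L []
    rw [lbucket_getD, PySem.Dict.getD_empty, List.nil_append]
  rw [hkeys, hcodes]
  rfl
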